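-- pv_equiv track=rewrite | github.com/ysfesr/YT-COMMENTS-ANALYSIS | main/functions.py | calcule
-- ===== SOURCE A (Python) =====
-- def calcule(polarity):
--     pos = neg = neu = 0
--     for x in polarity:
--         if x > 0:
--             pos += 1
--         elif x < 0:
--             neg += 1
--         else:
--             neu += 1
--     return pos,neg,neu
-- ===== SOURCE B (Python) =====
-- def calcule(polarity):
--     lst = list(polarity)
--     pos = sum(1 for x in lst if x > 0)
--     neg = sum(1 for x in lst if x < 0)
--     return pos, neg, len(lst) - pos - neg
-- ===== Notes on version B (the rewrite author's own statement) =====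
-- stated objective: alternative
-- what changed: Replaces A's single if/elif/else loop over three accumulators with independent countp-style scans (pos, neg) and computes neutral as len - pos - neg.
import Mathlib
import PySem

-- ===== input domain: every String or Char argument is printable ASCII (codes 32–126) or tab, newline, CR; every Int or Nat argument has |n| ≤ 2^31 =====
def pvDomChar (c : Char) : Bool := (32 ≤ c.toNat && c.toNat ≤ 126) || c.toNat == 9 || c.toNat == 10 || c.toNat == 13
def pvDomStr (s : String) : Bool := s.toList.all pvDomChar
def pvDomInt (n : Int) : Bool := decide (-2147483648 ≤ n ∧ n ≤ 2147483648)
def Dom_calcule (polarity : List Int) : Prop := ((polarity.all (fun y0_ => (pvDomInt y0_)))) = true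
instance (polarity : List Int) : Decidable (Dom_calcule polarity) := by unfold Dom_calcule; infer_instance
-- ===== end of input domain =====

-- B counts positives and negatives by separate scans and derives neutral by subtraction; same O(n) cost, different decomposition.

-- ===== PORT A =====
-- single fold over the accumulator triple (pos, neg, neu), branches in A's order
def calcule (polarity : List Int) : Int × Int × Int :=
  polarity.foldl
    (fun (s : Int × Int × Int) x =>
      if x > 0 then (s.1 + 1, s.2.1, s.2.2)
      else if x < 0 then (s.1, s.2.1 + 1, s.2.2)
      else (s.1, s.2.1, s.2.2 + 1))
    (0, 0, 0)

-- ===== PORT B =====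
def calcule_alt (polarity : List Int) : Int × Int × Int :=
  let pos : Int := (polarity.countP (fun x => x > 0) : Nat)
  let neg : Int := (polarity.countP (fun x => x < 0) : Nat)
  (pos, neg, (polarity.length : Int) - pos - neg)

-- ===== PRECONDITION & SPEC =====
def Spec_calcule (polarity : List Int) (out : Int × Int × Int) : Prop := out = calcule_alt polarity
instance (polarity : List Int) (out : Int × Int × Int) : Decidable (Spec_calcule polarity out) := by unfold Spec_calcule; infer_instance

-- ===== CLAIM (what is proved, stated in full; the proofs are below) =====
def Claim_equal_calcule : Prop := ∀ (polarity : List Int), Dom_calcule polarity → Spec_calcule polarity (calcule polarity)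

-- ===== LEMMAS AND PROOFS =====
theorem calcule_foldl_shift (polarity : List Int) (p n u : Int) :
    polarity.foldl
      (fun (s : Int × Int × Int) x =>
        if x > 0 then (s.1 + 1, s.2.1, s.2.2)
        else if x < 0 then (s.1, s.2.1 + 1, s.2.2)
        else (s.1, s.2.1, s.2.2 + 1))
      (p, n, u)
    = (p + (polarity.countP (fun x => x > 0) : Nat),
       n + (polarity.countP (fun x => x < 0) : Nat),
       u + (polarity.length : Int)
         - (polarity.countP (fun x => x > 0) : Nat)
         - (polarity.countP (fun x => x < 0) : Nat)) := by
  induction polarity generalizing p n u with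
  | nil => simp
  | cons y ys ih =>
    simp only [List.foldl_cons, List.countP_cons, List.length_cons]
    by_cases h1 : y > 0
    · simp [h1, ih, Prod.ext_iff]
      split_ifs <;> omega
    · by_cases h2 : y < 0
      · have h1' : ¬ (0 < y) := h1
        simp [h2, h1', ih, Prod.ext_iff]
        omega
      · have h1' : ¬ (0 < y) := h1
        simp [h2, h1', ih, Prod.ext_iff]
        omega

-- ===== VERDICT (by name: the statement is the Claim_ definition above) =====
theorem calcule_spec : Claim_equal_calcule := by
  intro polarity _
  unfold Spec_calcule calcule calcule_alt
  have h := calcule_foldl_shift polarity 0 0 0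
  simp only [zero_add] at h
  rw [h]
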